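-- pv_equiv track=rewrite | github.com/mattsigal/AutoBubbler | AutoBubbler.py | cluster_by_y
-- ===== SOURCE A (Python) =====
-- def cluster_by_y(items, gap=6):
--     items.sort(key=lambda i: i["center"][1])
--     rows = []
--     curr = [items[0]]
--     for x in items[1:]:
--         if x["center"][1] - curr[-1]["center"][1] < gap:
--             curr.append(x)
--         else:
--             rows.append(curr)
--             curr = [x]
--     rows.append(curr)
--     return rows
-- ===== SOURCE B (Python) =====
-- def cluster_by_y(items, gap=6):
--     # Return-value equivalence; like A, this sorts `items` in place.
--     items.sort(key=lambda i: i["center"][1])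
--     if not items:
--         return []
--     n = len(items)
--     cuts = [i for i in range(1, n)
--             if items[i]["center"][1] - items[i - 1]["center"][1] >= gap]
--     bounds = [0] + cuts + [n]
--     return [items[a:b] for a, b in zip(bounds, bounds[1:])]
-- ===== Notes on version B (the rewrite author's own statement) =====
-- stated objective: alternative
-- what changed: Instead of a single accumulator pass that flushes the current row at each large gap, B sorts, computes the list of break indices where the consecutive y-gap is >= gap, and builds the rows by slicing the sorted list between consecutive bounds.
import Mathlib
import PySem

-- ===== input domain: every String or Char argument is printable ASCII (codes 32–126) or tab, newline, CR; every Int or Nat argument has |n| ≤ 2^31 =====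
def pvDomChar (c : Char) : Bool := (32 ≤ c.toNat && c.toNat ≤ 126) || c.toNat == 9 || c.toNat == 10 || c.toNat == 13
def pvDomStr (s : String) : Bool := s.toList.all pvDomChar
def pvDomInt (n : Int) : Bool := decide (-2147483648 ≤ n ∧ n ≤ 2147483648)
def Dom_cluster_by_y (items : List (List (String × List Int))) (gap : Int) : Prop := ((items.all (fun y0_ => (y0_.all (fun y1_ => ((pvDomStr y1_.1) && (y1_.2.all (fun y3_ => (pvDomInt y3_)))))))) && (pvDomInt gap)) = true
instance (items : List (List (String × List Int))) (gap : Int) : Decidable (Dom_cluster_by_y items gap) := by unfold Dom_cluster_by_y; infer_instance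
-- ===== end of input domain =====

-- B replaces A's one-pass accumulator (flush the current row at each big gap) by computing the
-- break indices on the sorted list and slicing it between consecutive bounds; same cost,
-- alternative decomposition.  Return-value equivalence only: both Pythons sort `items` in place.

-- i["center"][1], total with defaults; exact under Pre_ (key present, value list of length ≥ 2)
def pvKeyY (d : List (String × List Int)) : Int :=
  (PySem.List.pyGet? (PySem.Dict.getD (PySem.Dict.mk d) "center" []) 1).getD 0

-- ===== PORT A =====
def cluster_by_y (items : List (List (String × List Int))) (gap : Int) : List (List (List (String × List Int))) :=
  let s := PySem.List.sorted items (fun i => pvKeyY i) false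
  match s with
  | [] => []  -- Python raises IndexError at items[0]; excluded by Pre_
  | h :: t =>
    let st := t.foldl
      (fun (st : List (List (List (String × List Int))) × List (List (String × List Int))) x =>
        if pvKeyY x - pvKeyY (PySem.List.pyGetD st.2 (-1) []) < gap then (st.1, st.2 ++ [x])
        else (st.1 ++ [st.2], [x]))
      ([], [h])
    st.1 ++ [st.2]

-- ===== PORT B =====
def cluster_by_y_alt (items : List (List (String × List Int))) (gap : Int) : List (List (List (String × List Int))) :=
  let s := PySem.List.sorted items (fun i => pvKeyY i) false
  if s.isEmpty then []
  else
    let n : Int := s.length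
    let cuts := (PySem.List.pyRange 1 n 1).filter
      (fun i => decide (gap ≤ pvKeyY (PySem.List.pyGetD s i []) - pvKeyY (PySem.List.pyGetD s (i - 1) [])))
    let bounds := 0 :: (cuts ++ [n])
    (bounds.zip bounds.tail).map (fun ab => PySem.List.slice s (some ab.1) (some ab.2))

-- ===== PRECONDITION & SPEC =====
-- Pre_ excludes exactly the inputs where Python A raises: the empty list (IndexError at items[0])
-- and items whose "center" entry is missing or shorter than 2 (KeyError/IndexError in the sort key).
def pvCenterOk (d : List (String × List Int)) : Bool :=
  match PySem.Dict.get? (PySem.Dict.mk d) "center" with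
  | some ys => decide (2 ≤ ys.length)
  | none => false
def Pre_cluster_by_y (items : List (List (String × List Int))) (gap : Int) : Prop :=
  items ≠ [] ∧ ∀ d ∈ items, pvCenterOk d = true
instance (items : List (List (String × List Int))) (gap : Int) : Decidable (Pre_cluster_by_y items gap) := by
  unfold Pre_cluster_by_y; infer_instance
def pvWitness_cluster_by_y : (List (List (String × List Int))) × Int :=
  ([[("center", [0, 1])], [("center", [0, 9])]], 6)

def Spec_cluster_by_y (items : List (List (String × List Int))) (gap : Int) (out : List (List (List (String × List Int)))) : Prop := out = cluster_by_y_alt items gap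
instance (items : List (List (String × List Int))) (gap : Int) (out : List (List (List (String × List Int)))) : Decidable (Spec_cluster_by_y items gap out) := by unfold Spec_cluster_by_y; infer_instance

-- ===== CLAIM (what is proved, stated in full; the proofs are below) =====
def Claim_equal_cluster_by_y : Prop := ∀ (items : List (List (String × List Int))) (gap : Int), Dom_cluster_by_y items gap → Pre_cluster_by_y items gap → Spec_cluster_by_y items gap (cluster_by_y items gap)

-- ===== LEMMAS AND PROOFS =====

-- grouping of t after a previous element x: (rest of the current group, later groups)
def chopP {α : Type} (k : α → Int) (gap : Int) : α → List α → List α × List (List α)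
  | _, [] => ([], [])
  | x, y :: t =>
    let r := chopP k gap y t
    if k y - k x < gap then (y :: r.1, r.2) else ([], (y :: r.1) :: r.2)

-- cumulative end-offsets of the groups, starting from offset a
def cumAll {α : Type} : Int → List (List α) → List Int
  | _, [] => []
  | a, g :: gs => (a + g.length) :: cumAll (a + g.length) gs

-- cut positions of the grouping of t after x (x at absolute index a - 1), plus the final length
def bnds {α : Type} (k : α → Int) (gap : Int) : α → List α → Int → List Int
  | _, [], a => [a]
  | x, y :: t, a => if k y - k x < gap then bnds k gap y t (a + 1) else a :: bnds k gap y t (a + 1)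

theorem chopP_flatten {α : Type} (k : α → Int) (gap : Int) :
    ∀ (t : List α) (x : α),
      ((x :: (chopP k gap x t).1) :: (chopP k gap x t).2).flatten = x :: t := by
  intro t
  induction t with
  | nil => intro x; simp [chopP]
  | cons y t ih =>
    intro x
    have h2 := ih y
    by_cases h : k y - k x < gap <;> simp [chopP, h] <;> simpa using h2

-- the loop body of A
def stepF {α : Type} (k : α → Int) (gap : Int) (d : α) :
    List (List α) × List α → α → List (List α) × List α :=
  fun st y =>
    if k y - k (PySem.List.pyGetD st.2 (-1) d) < gap then (st.1, st.2 ++ [y])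
    else (st.1 ++ [st.2], [y])

theorem foldA {α : Type} (k : α → Int) (gap : Int) (d : α) :
    ∀ (t : List α) (rows : List (List α)) (curr : List α) (x : α),
      curr.getLast? = some x →
      (t.foldl (stepF k gap d) (rows, curr)).1 ++ [(t.foldl (stepF k gap d) (rows, curr)).2]
      = rows ++ (curr ++ (chopP k gap x t).1) :: (chopP k gap x t).2 := by
  intro t
  induction t with
  | nil => intro rows curr x _; simp [chopP]
  | cons y t ih =>
    intro rows curr x hl
    have hne : curr ≠ [] := by intro hc; rw [hc] at hl; simp at hl
    have hlast : PySem.List.pyGetD curr (-1) d = x := by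
      rw [PySem.List.pyGetD_neg_one curr d hne]
      have := List.getLast?_eq_some_getLast hne
      rw [this] at hl; exact Option.some_injective _ hl
    rw [List.foldl_cons]
    by_cases h : k y - k x < gap
    · rw [show stepF k gap d (rows, curr) y = (rows, curr ++ [y]) by
        simp [stepF, hlast, h]]
      rw [ih rows (curr ++ [y]) y List.getLast?_concat]
      simp [chopP, h]
    · rw [show stepF k gap d (rows, curr) y = (rows ++ [curr], [y]) by
        simp [stepF, hlast, h]]
      rw [ih (rows ++ [curr]) [y] y rfl]
      simp [chopP, h]

theorem cutsEq {α : Type} (k : α → Int) (gap : Int) (d : α) :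
    ∀ (t u : List α) (x : α), u.getLast? = some x →
      ((PySem.List.pyRange (u.length : Int) (((u ++ t).length : Nat) : Int) 1).filter
        (fun i => decide (gap ≤ k (PySem.List.pyGetD (u ++ t) i d) - k (PySem.List.pyGetD (u ++ t) (i - 1) d))))
        ++ [(((u ++ t).length : Nat) : Int)]
      = bnds k gap x t (u.length : Int) := by
  intro t
  induction t with
  | nil =>
    intro u x _
    rw [PySem.List.pyRange_one_eq_nil (by simp)]
    simp [bnds]
  | cons y t ih =>
    intro u x hl
    have hne : u ≠ [] := by intro hc; rw [hc] at hl; simp at hl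
    have hupos : 1 ≤ u.length := List.length_pos_iff.mpr hne
    have hlt : (u.length : Int) < (((u ++ y :: t).length : Nat) : Int) := by
      simp [List.length_append]
    rw [PySem.List.pyRange_one_cons hlt, List.filter_cons]
    have h1 : PySem.List.pyGetD (u ++ y :: t) ((u.length : Nat) : Int) d = y := by
      rw [PySem.List.pyGetD_natCast]
      simp [List.getD]
    have h2 : PySem.List.pyGetD (u ++ y :: t) (((u.length : Nat) : Int) - 1) d = x := by
      have hc : ((u.length : Nat) : Int) - 1 = ((u.length - 1 : Nat) : Int) := by
        push_cast [hupos]; ring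
      rw [hc, PySem.List.pyGetD_natCast]
      have := List.getLast?_eq_getElem? (l := u)
      rw [hl] at this
      rw [List.getD, List.getElem?_append_left (by omega), ← this]
      rfl
    have hI := ih (u ++ [y]) y List.getLast?_concat
    simp only [List.append_assoc, List.singleton_append, List.length_append,
      List.length_cons, List.length_nil, Nat.cast_add, Nat.cast_one, zero_add] at hI ⊢
    rw [h1, h2]
    by_cases h : k y - k x < gap
    · rw [show decide (gap ≤ k y - k x) = false by simp; omega]
      simp only [Bool.false_eq_true, if_false]
      rw [show bnds k gap x (y :: t) (u.length : Int) =
            bnds k gap y t ((u.length : Int) + 1) by simp [bnds, h]]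
      exact hI
    · rw [show decide (gap ≤ k y - k x) = true by simp; omega]
      simp only [if_true]
      rw [show bnds k gap x (y :: t) (u.length : Int) =
            (u.length : Int) :: bnds k gap y t ((u.length : Int) + 1) by simp [bnds, h]]
      rw [← hI]
      simp

theorem bnds_eq_cumAll {α : Type} (k : α → Int) (gap : Int) :
    ∀ (t : List α) (x : α) (a : Int),
      bnds k gap x t a = cumAll (a - 1) ((x :: (chopP k gap x t).1) :: (chopP k gap x t).2) := by
  intro t
  induction t with
  | nil =>
    intro x a
    simp only [bnds, chopP, cumAll, List.length_cons, List.length_nil]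
    rw [List.cons_eq_cons]
    exact ⟨by push_cast [List.length_nil, List.length_cons]; ring, rfl⟩
  | cons y t ih =>
    intro x a
    by_cases h : k y - k x < gap
    · rw [show bnds k gap x (y :: t) a = bnds k gap y t (a + 1) by simp [bnds, h]]
      rw [ih y (a + 1)]
      simp only [chopP, h, if_pos, add_sub_cancel_right]
      simp only [cumAll, List.length_cons]
      rw [List.cons_eq_cons]
      refine ⟨by push_cast [List.length_nil, List.length_cons]; ring, ?_⟩
      congr 1
      push_cast [List.length_nil, List.length_cons]; ring
    · rw [show bnds k gap x (y :: t) a = a :: bnds k gap y t (a + 1) by simp [bnds, h]]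
      rw [ih y (a + 1)]
      simp only [chopP, h, if_false, add_sub_cancel_right]
      simp only [cumAll, List.length_cons]
      rw [List.cons_eq_cons]
      refine ⟨by push_cast [List.length_nil, List.length_cons]; ring, ?_⟩
      rw [List.cons_eq_cons]
      refine ⟨by push_cast [List.length_nil, List.length_cons]; ring, ?_⟩
      congr 1
      push_cast [List.length_nil, List.length_cons]; ring

theorem sliceEq {α : Type} :
    ∀ (gs : List (List α)) (pre : List α),
      (((pre.length : Int) :: cumAll (pre.length : Int) gs).zip (cumAll (pre.length : Int) gs)).map
        (fun ab => PySem.List.slice (pre ++ gs.flatten) (some ab.1) (some ab.2)) = gs := by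
  intro gs
  induction gs with
  | nil => intro pre; simp [cumAll]
  | cons g gs ih =>
    intro pre
    have hlen : (((pre ++ g).length : Nat) : Int) = (pre.length : Int) + (g.length : Int) := by
      push_cast [List.length_append]; ring
    have hI := ih (pre ++ g)
    rw [hlen, List.append_assoc] at hI
    simp only [cumAll, List.flatten_cons, List.zip_cons_cons, List.map_cons]
    rw [List.cons_eq_cons]
    refine ⟨?_, hI⟩
    rw [PySem.List.slice_natCast_add, List.drop_left, List.take_left]

-- ===== VERDICT (by name: the statement is the Claim_ definition above) =====
theorem cluster_by_y_spec : Claim_equal_cluster_by_y := by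
  intro items gap _ _
  unfold Spec_cluster_by_y cluster_by_y cluster_by_y_alt
  cases hs : PySem.List.sorted items (fun i => pvKeyY i) false with
  | nil => simp
  | cons h t =>
    simp only [hs, List.isEmpty_cons, Bool.false_eq_true, if_false]
    have hA := foldA pvKeyY gap ([] : List (String × List Int)) t
      ([] : List (List (List (String × List Int)))) [h] h (by simp)
    unfold stepF at hA
    rw [hA]
    have hB : List.filter
        (fun i => decide (gap ≤ pvKeyY (PySem.List.pyGetD (h :: t) i []) -
          pvKeyY (PySem.List.pyGetD (h :: t) (i - 1) [])))
        (PySem.List.pyRange 1 (((h :: t).length : Nat) : Int) 1) ++ [(((h :: t).length : Nat) : Int)]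
        = cumAll 0 ((h :: (chopP pvKeyY gap h t).1) :: (chopP pvKeyY gap h t).2) :=
      (cutsEq pvKeyY gap ([] : List (String × List Int)) t [h] h rfl).trans
        (bnds_eq_cumAll pvKeyY gap t h (([h].length : Nat) : Int))
    have hS := sliceEq ((h :: (chopP pvKeyY gap h t).1) :: (chopP pvKeyY gap h t).2)
      ([] : List (List (String × List Int)))
    simp only [List.nil_append, List.length_nil, Nat.cast_zero, chopP_flatten] at hS
    simp only [List.tail_cons]
    rw [hB]
    rw [hS]
    simp
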